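-- pv_equiv track=rewrite | github.com/lVoidi/CE | recursion/tareacorta4.py | forme1_aux
-- ===== SOURCE A (Python) =====
-- def forme1_aux(num):
--     # Entrada: el numero para analizar
--     # Salida: La combinación de todos los unos
--     # Restricciones:
--     current_digit = num % 10
--
--     if num == 0: # caso base
--         return 0
--
--     if current_digit == 1:
--         return 1 + 10*forme1_aux(num // 10)
--     else:
--         return forme1_aux(num // 10)
-- ===== SOURCE B (Python) =====
-- def forme1_aux(num):
--     # Extract the digits into a list, then use list.count and the closed-form repunit.
--     digits = []
--     n = num
--     while n != 0:
--         digits.append(n % 10)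
--         n //= 10
--     return (10 ** digits.count(1) - 1) // 9
-- ===== Notes on version B (the rewrite author's own statement) =====
-- stated objective: alternative
-- what changed: Replaces the recursive build-up of the repunit (1 + 10*rec) by materialising the digit list, counting the 1-digits with list.count, and returning the closed-form repunit (10**k - 1)//9.
import Mathlib
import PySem

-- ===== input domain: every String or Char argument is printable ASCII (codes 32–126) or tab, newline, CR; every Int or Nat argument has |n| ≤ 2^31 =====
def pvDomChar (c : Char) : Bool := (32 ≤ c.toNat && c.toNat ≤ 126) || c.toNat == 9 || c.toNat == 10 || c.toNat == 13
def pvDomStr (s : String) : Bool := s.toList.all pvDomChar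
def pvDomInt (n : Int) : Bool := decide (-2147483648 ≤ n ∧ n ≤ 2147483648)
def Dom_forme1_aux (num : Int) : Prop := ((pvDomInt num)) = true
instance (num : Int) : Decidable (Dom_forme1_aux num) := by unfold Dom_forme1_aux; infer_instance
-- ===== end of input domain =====

-- B materialises the digit list, counts the 1-digits with list.count, and returns the
-- closed-form repunit; return values agree on all num ≥ 0 (A recurses forever on negatives).

-- ===== PORT A =====
-- A's recursion on the digits of a nonnegative number (num//10, num%10 of Python
-- coincide with Nat division/mod here); the Int wrapper applies it to num.toNat,
-- identity on the admitted domain num ≥ 0 (Python A never returns on num < 0).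
def forme1_auxA (n : Nat) : Int :=
  if h : n = 0 then 0
  else if n % 10 = 1 then 1 + 10 * forme1_auxA (n / 10)
  else forme1_auxA (n / 10)
decreasing_by all_goals exact Nat.div_lt_self (Nat.pos_of_ne_zero h) (by norm_num)

def forme1_aux (num : Int) : Int := forme1_auxA num.toNat

-- ===== PORT B =====
-- B's while loop collecting the digits, least significant first.
def digitsOf (n : Nat) : List Nat :=
  if h : n = 0 then []
  else n % 10 :: digitsOf (n / 10)
decreasing_by exact Nat.div_lt_self (Nat.pos_of_ne_zero h) (by norm_num)

def forme1_aux_alt (num : Int) : Int :=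
  ((10 : Int) ^ ((digitsOf num.toNat).count 1) - 1) / 9

-- ===== PRECONDITION & SPEC =====
-- A recurses forever (RecursionError) on num < 0, and B's loop would not terminate there either.
def Pre_forme1_aux (num : Int) : Prop := 0 ≤ num
instance (num : Int) : Decidable (Pre_forme1_aux num) := by unfold Pre_forme1_aux; infer_instance
def pvWitness_forme1_aux : Int := (210101 : Int)

def Spec_forme1_aux (num : Int) (out : Int) : Prop := out = forme1_aux_alt num
instance (num : Int) (out : Int) : Decidable (Spec_forme1_aux num out) := by unfold Spec_forme1_aux; infer_instance

-- ===== CLAIM (what is proved, stated in full; the proofs are below) =====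
def Claim_equal_forme1_aux : Prop := ∀ (num : Int), Dom_forme1_aux num → Pre_forme1_aux num → Spec_forme1_aux num (forme1_aux num)

-- ===== LEMMAS AND PROOFS =====
def repunit : Nat → Int
  | 0 => 0
  | k + 1 => 1 + 10 * repunit k

theorem repunit_mul (k : Nat) : (10 : Int) ^ k - 1 = 9 * repunit k := by
  induction k with
  | zero => simp [repunit]
  | succ k ih => rw [pow_succ, repunit]; ring_nf; ring_nf at ih; omega

theorem repunit_closed (k : Nat) : ((10 : Int) ^ k - 1) / 9 = repunit k := by
  rw [repunit_mul]; exact Int.mul_ediv_cancel_left _ (by norm_num)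

theorem auxA_eq_repunit (n : Nat) : forme1_auxA n = repunit ((digitsOf n).count 1) := by
  induction n using Nat.strong_induction_on with
  | _ n ih =>
    by_cases h : n = 0
    · simp [forme1_auxA, digitsOf, h, repunit]
    · have hlt : n / 10 < n := Nat.div_lt_self (Nat.pos_of_ne_zero h) (by norm_num)
      rw [forme1_auxA, digitsOf]
      by_cases h1 : n % 10 = 1
      · simp only [h, h1, if_true, dite_false, ih _ hlt, List.count_cons,
          beq_self_eq_true, if_true]
        rfl
      · simp [h, h1, ih _ hlt]

-- ===== VERDICT (by name: the statement is the Claim_ definition above) =====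
theorem forme1_aux_spec : Claim_equal_forme1_aux := by
  intro num _ _
  unfold Spec_forme1_aux forme1_aux forme1_aux_alt
  rw [repunit_closed, auxA_eq_repunit]
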